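-- pv_equiv track=rewrite | github.com/deepakness/seo-blogs | scripts/sync_dataset.py | pick_preferred
-- ===== SOURCE A (Python) =====
-- def pick_preferred(rows):
--     """Keep one row per blog name, preferring HTTPS URLs."""
--     chosen = {}
--     order = []
--     for row in rows:
--         name = row['SEO Blog Name'].strip()
--         url = row['SEO Blog URL'].strip()
--         entry = {'SEO Blog Name': name, 'SEO Blog URL': url}
--         if name not in chosen:
--             chosen[name] = entry
--             order.append(name)
--             continue
--
--         prev = chosen[name]['SEO Blog URL']
--         if prev.startswith('http://') and url.startswith('https://'):
--             chosen[name] = entry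
--
--     return [chosen[name] for name in order]
-- ===== SOURCE B (Python) =====
-- def pick_preferred(rows):
--     """Keep one row per blog name, preferring HTTPS URLs."""
--     groups = {}
--     for row in rows:
--         name = row['SEO Blog Name'].strip()
--         url = row['SEO Blog URL'].strip()
--         groups.setdefault(name, []).append(url)
--     result = []
--     for name, urls in groups.items():
--         url = urls[0]
--         if url.startswith('http://'):
--             for u in urls[1:]:
--                 if u.startswith('https://'):
--                     url = u
--                     break
--         result.append({'SEO Blog Name': name, 'SEO Blog URL': url})
--     return result
-- ===== Notes on version B (the rewrite author's own statement) =====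
-- stated objective: alternative
-- what changed: Replaces A's single-pass dedupe with inline on-the-fly HTTPS upgrades by a two-phase group-then-reduce decomposition: first build an insertion-ordered dict of stripped URLs per stripped name, then reduce each group to its first URL, upgraded to the group's first https URL only when the first URL starts with http://.
import Mathlib
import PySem

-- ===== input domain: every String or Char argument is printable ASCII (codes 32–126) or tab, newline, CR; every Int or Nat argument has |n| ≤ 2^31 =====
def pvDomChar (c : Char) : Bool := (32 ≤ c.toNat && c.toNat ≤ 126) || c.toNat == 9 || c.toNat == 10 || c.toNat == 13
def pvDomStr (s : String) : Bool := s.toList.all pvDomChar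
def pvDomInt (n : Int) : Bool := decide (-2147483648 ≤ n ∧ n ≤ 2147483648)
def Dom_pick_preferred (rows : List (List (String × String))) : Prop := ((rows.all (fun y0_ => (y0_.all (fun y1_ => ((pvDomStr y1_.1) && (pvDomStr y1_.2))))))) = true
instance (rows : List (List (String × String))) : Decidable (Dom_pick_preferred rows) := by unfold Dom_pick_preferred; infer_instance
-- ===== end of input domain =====

-- B replaces A's inline single-pass "upgrade on the fly" dedupe by a group-then-reduce
-- decomposition (group stripped URLs per name, then pick each group's URL); alternative, not faster.


-- ===== PORT A =====
-- row['SEO Blog Name'].strip() / row['SEO Blog URL'].strip() (shared by both ports; under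
-- Pre_ the key is present, so getD "" is exact)
def rowName (row : List (String × String)) : String :=
  PySem.Str.strip ((PySem.Dict.ofList row).getD "SEO Blog Name" "")

def rowUrl (row : List (String × String)) : String :=
  PySem.Str.strip ((PySem.Dict.ofList row).getD "SEO Blog URL" "")

def aStep (st : PySem.Dict String (List (String × String)) × List String)
    (row : List (String × String)) :
    PySem.Dict String (List (String × String)) × List String :=
  let chosen := st.1
  let order := st.2
  let name := rowName row
  let url := rowUrl row
  let entry : List (String × String) := [("SEO Blog Name", name), ("SEO Blog URL", url)]
  if chosen.contains name = false then
    (chosen.insert name entry, order ++ [name])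
  else
    let prev := (PySem.Dict.ofList (chosen.getD name [])).getD "SEO Blog URL" ""
    if PySem.Str.startswith prev "http://" && PySem.Str.startswith url "https://" then
      (chosen.insert name entry, order)
    else
      (chosen, order)

def pick_preferred (rows : List (List (String × String))) : List (List (String × String)) :=
  let st := rows.foldl aStep (PySem.Dict.empty, [])
  st.2.map (fun name => st.1.getD name [])

-- ===== PORT B =====
-- the inner 'for u in urls[1:]: if u.startswith("https://"): url = u; break' loop
def firstHttps : List String → Option String
  | [] => none
  | u :: rest => if PySem.Str.startswith u "https://" then some u else firstHttps rest

-- reduce one group: urls[0], upgraded to the first https URL if urls[0] is http://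
def pickUrl (urls : List String) : String :=
  match urls with
  | [] => ""          -- unreachable: every group holds at least one URL
  | u0 :: rest =>
    if PySem.Str.startswith u0 "http://" then (firstHttps rest).getD u0 else u0

def bStep (g : PySem.Dict String (List String)) (row : List (String × String)) :
    PySem.Dict String (List String) :=
  g.modify (rowName row) [] (· ++ [rowUrl row])

def pick_preferred_alt (rows : List (List (String × String))) : List (List (String × String)) :=
  let groups := rows.foldl bStep PySem.Dict.empty
  groups.items.map (fun p =>
    [("SEO Blog Name", p.1), ("SEO Blog URL", pickUrl p.2)])

-- ===== PRECONDITION & SPEC =====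
-- Pre_ excludes exactly the rows missing one of the two keys, on which Python A raises KeyError.
def Pre_pick_preferred (rows : List (List (String × String))) : Prop :=
  ∀ row ∈ rows, (PySem.Dict.ofList row).contains "SEO Blog Name" = true ∧
    (PySem.Dict.ofList row).contains "SEO Blog URL" = true
instance (rows : List (List (String × String))) : Decidable (Pre_pick_preferred rows) := by
  unfold Pre_pick_preferred; infer_instance

def pvWitness_pick_preferred : (List (List (String × String))) :=
  [[("SEO Blog Name", "a"), ("SEO Blog URL", "http://a.com")],
   [("SEO Blog Name", "a "), ("SEO Blog URL", "https://a.com")]]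

def Spec_pick_preferred (rows : List (List (String × String))) (out : List (List (String × String))) : Prop := out = pick_preferred_alt rows
instance (rows : List (List (String × String))) (out : List (List (String × String))) : Decidable (Spec_pick_preferred rows out) := by unfold Spec_pick_preferred; infer_instance

-- ===== CLAIM (what is proved, stated in full; the proofs are below) =====
def Claim_equal_pick_preferred : Prop := ∀ (rows : List (List (String × String))), Dom_pick_preferred rows → Pre_pick_preferred rows → Spec_pick_preferred rows (pick_preferred rows)

-- ===== LEMMAS AND PROOFS =====

theorem not_http_of_https (s : String)
    (h : PySem.Str.startswith s "https://" = true) :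
    PySem.Str.startswith s "http://" = false := by
  by_contra hc
  have h2 : PySem.Str.startswith s "http://" = true := by
    cases hcv : PySem.Str.startswith s "http://" with
    | false => exact absurd hcv hc
    | true => rfl
  rw [PySem.Str.startswith_eq, PySem.Chars.startswith_iff] at h h2
  rcases List.prefix_or_prefix_of_prefix h2 h with h3 | h3
  · exact absurd h3 (by decide)
  · exact absurd h3 (by decide)

theorem firstHttps_eq_find? (l : List String) :
    firstHttps l = l.find? (fun u => PySem.Str.startswith u "https://") := by
  induction l with
  | nil => rfl
  | cons x xs ih =>
    rw [firstHttps, List.find?_cons, ih]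
    cases hx : PySem.Str.startswith x "https://" <;> simp

-- pickUrl over a group grown by one URL is exactly A's inline upgrade step
theorem pickUrl_append (urls : List String) (u : String) (h : urls ≠ []) :
    pickUrl (urls ++ [u]) =
      if PySem.Str.startswith (pickUrl urls) "http://" && PySem.Str.startswith u "https://"
      then u else pickUrl urls := by
  cases urls with
  | nil => exact absurd rfl h
  | cons u0 rest =>
    have hl : pickUrl ((u0 :: rest) ++ [u]) =
        if PySem.Str.startswith u0 "http://" then (firstHttps (rest ++ [u])).getD u0 else u0 := rfl
    have hr : pickUrl (u0 :: rest) =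
        if PySem.Str.startswith u0 "http://" then (firstHttps rest).getD u0 else u0 := rfl
    by_cases h0 : PySem.Str.startswith u0 "http://" = true
    · rw [hl, hr, if_pos h0, if_pos h0]
      rw [firstHttps_eq_find?, firstHttps_eq_find?, List.find?_append]
      cases hf : rest.find? (fun u => PySem.Str.startswith u "https://") with
      | some v =>
        have hv : PySem.Str.startswith v "https://" = true := by
          simpa using List.find?_some hf
        rw [Option.some_or, Option.getD_some, not_http_of_https v hv, Bool.false_and,
          if_neg (by simp)]
      | none =>
        rw [Option.none_or, Option.getD_none, h0, Bool.true_and]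
        cases hu : PySem.Str.startswith u "https://" with
        | true => rw [List.find?_cons_of_pos (by simpa using hu), Option.getD_some, if_pos rfl]
        | false =>
          rw [List.find?_cons_of_neg (by simpa using hu), List.find?_nil, Option.getD_none,
            if_neg (by simp)]
    · have h0f : PySem.Str.startswith u0 "http://" = false := eq_false_of_ne_true h0
      rw [hl, hr, if_neg h0, if_neg h0, h0f, Bool.false_and, if_neg (by simp)]

def entryOf (n v : String) : List (String × String) :=
  [("SEO Blog Name", n), ("SEO Blog URL", v)]

-- the entry dict stored by A yields back its URL
theorem entry_url (n v : String) :
    (PySem.Dict.ofList (entryOf n v)).getD "SEO Blog URL" "" = v := rfl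

-- invariant relating A's (chosen, order) to B's groups dict
def InvAB (chosen : PySem.Dict String (List (String × String))) (order : List String)
    (g : PySem.Dict String (List String)) : Prop :=
  order = g.keys ∧
  (∀ k, chosen.contains k = g.contains k) ∧
  (∀ k, g.contains k = true →
     chosen.getD k [] = entryOf k (pickUrl (g.getD k [])) ∧ g.getD k [] ≠ [])

theorem inv_step (chosen : PySem.Dict String (List (String × String))) (order : List String)
    (g : PySem.Dict String (List String)) (row : List (String × String))
    (h : InvAB chosen order g) :
    InvAB (aStep (chosen, order) row).1 (aStep (chosen, order) row).2 (bStep g row) := by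
  obtain ⟨hord, hcon, hval⟩ := h
  set n := rowName row with hn
  set u := rowUrl row with hu
  by_cases hc : chosen.contains n = true
  · -- existing name
    have hgc : g.contains n = true := by rw [← hcon]; exact hc
    obtain ⟨hent, hne⟩ := hval n hgc
    set urls := g.getD n [] with hurls
    have hprev : (PySem.Dict.ofList (chosen.getD n [])).getD "SEO Blog URL" "" = pickUrl urls := by
      rw [hent]; exact entry_url n (pickUrl urls)
    have hkeys : (bStep g row).keys = g.keys := by
      rw [bStep, PySem.Dict.keys_modify, PySem.Dict.keys_insert_of_contains]
      exact hgc
    have hgetDn : (bStep g row).getD n [] = urls ++ [u] := by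
      rw [bStep, PySem.Dict.getD_modify, if_pos rfl]
    have hcon' : ∀ k, (bStep g row).contains k = ((k == n) || g.contains k) := by
      intro k; rw [bStep, PySem.Dict.contains_modify]
    have hoth : ∀ k, k ≠ n → (bStep g row).getD k [] = g.getD k [] := by
      intro k hk; rw [bStep, PySem.Dict.getD_modify, if_neg hk]
    have hmem : ∀ k, k ≠ n → (bStep g row).contains k = true → g.contains k = true := by
      intro k hk h1
      rw [hcon' k, Bool.or_eq_true] at h1
      rcases h1 with h2 | h2
      · exact absurd (by simpa using h2) hk
      · exact h2
    by_cases hcond : (PySem.Str.startswith (pickUrl urls) "http://" &&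
        PySem.Str.startswith u "https://") = true
    · -- upgrade branch
      have hstep : aStep (chosen, order) row = (chosen.insert n (entryOf n u), order) := by
        simp only [aStep, ← hn, ← hu, hc]
        rw [if_neg (by simp), hprev, if_pos hcond]
        rfl
      rw [hstep]
      refine ⟨by rw [hkeys]; exact hord, ?_, ?_⟩
      · intro k
        rw [PySem.Dict.contains_insert, hcon' k, hcon k]
      · intro k hk
        by_cases hkn : k = n
        · subst hkn
          rw [hgetDn, PySem.Dict.getD_insert, if_pos rfl]
          exact ⟨by rw [pickUrl_append urls u hne, if_pos hcond], by simp⟩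
        · obtain ⟨h1, h2⟩ := hval k (hmem k hkn hk)
          rw [hoth k hkn, PySem.Dict.getD_insert, if_neg hkn]
          exact ⟨h1, h2⟩
    · -- keep branch
      have hstep : aStep (chosen, order) row = (chosen, order) := by
        simp only [aStep, ← hn, ← hu, hc]
        rw [if_neg (by simp), hprev, if_neg hcond]
      rw [hstep]
      refine ⟨by rw [hkeys]; exact hord, ?_, ?_⟩
      · intro k
        rw [hcon' k, hcon k]
        by_cases hk : k = n
        · simp [hk, hgc]
        · simp [(by simpa using hk : (k == n) = false)]
      · intro k hk
        by_cases hkn : k = n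
        · subst hkn
          rw [hgetDn]
          refine ⟨?_, by simp⟩
          rw [pickUrl_append urls u hne, if_neg hcond, hent]
        · rw [hoth k hkn]
          exact hval k (hmem k hkn hk)
  · -- new name
    have hcf : chosen.contains n = false := eq_false_of_ne_true hc
    have hgc : g.contains n = false := by rw [← hcon]; exact hcf
    have hstep : aStep (chosen, order) row =
        (chosen.insert n (entryOf n u), order ++ [n]) := by
      simp only [aStep, ← hn, ← hu]
      rw [if_pos hcf]
      rfl
    have hkeys : (bStep g row).keys = g.keys ++ [n] := by
      rw [bStep, PySem.Dict.keys_modify, PySem.Dict.keys_insert_of_not_contains _ _ hgc]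
    have hcon' : ∀ k, (bStep g row).contains k = ((k == n) || g.contains k) := by
      intro k; rw [bStep, PySem.Dict.contains_modify]
    have hgetDn : (bStep g row).getD n [] = [u] := by
      rw [bStep, PySem.Dict.getD_modify, if_pos rfl,
        PySem.Dict.getD_of_not_contains g _ hgc]
      rfl
    rw [hstep]
    refine ⟨by rw [hkeys, hord], ?_, ?_⟩
    · intro k; rw [PySem.Dict.contains_insert, hcon' k, hcon k]
    · intro k hk
      by_cases hkn : k = n
      · subst hkn
        rw [hgetDn, PySem.Dict.getD_insert, if_pos rfl]
        constructor
        · show entryOf n u = entryOf n (pickUrl [u])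
          rw [pickUrl]
          split
          · rfl
          · rfl
        · simp
      · have hgk : g.contains k = true := by
          rw [hcon' k, Bool.or_eq_true] at hk
          rcases hk with h1 | h1
          · exact absurd (by simpa using h1) hkn
          · exact h1
        obtain ⟨h1, h2⟩ := hval k hgk
        have hgd : (bStep g row).getD k [] = g.getD k [] := by
          rw [bStep, PySem.Dict.getD_modify, if_neg hkn]
        rw [hgd, PySem.Dict.getD_insert, if_neg hkn]
        exact ⟨h1, h2⟩

theorem inv_foldl (rows : List (List (String × String)))
    (chosen : PySem.Dict String (List (String × String))) (order : List String)
    (g : PySem.Dict String (List String)) (h : InvAB chosen order g) :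
    InvAB (rows.foldl aStep (chosen, order)).1 (rows.foldl aStep (chosen, order)).2
      (rows.foldl bStep g) := by
  induction rows generalizing chosen order g with
  | nil => exact h
  | cons r rs ih =>
    simp only [List.foldl_cons]
    have hps := inv_step chosen order g r h
    have hpair : aStep (chosen, order) r =
        ((aStep (chosen, order) r).1, (aStep (chosen, order) r).2) := rfl
    rw [hpair]
    exact ih _ _ _ hps

-- ===== VERDICT (by name: the statement is the Claim_ definition above) =====
theorem pick_preferred_spec : Claim_equal_pick_preferred := by
  intro rows _ _
  unfold Spec_pick_preferred
  have hinv := inv_foldl rows PySem.Dict.empty [] PySem.Dict.empty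
    ⟨rfl, fun _ => rfl, fun k hk => absurd hk (by simp [PySem.Dict.contains, PySem.Dict.empty])⟩
  obtain ⟨hord, hcon, hval⟩ := hinv
  have hA : pick_preferred rows = (rows.foldl aStep (PySem.Dict.empty, [])).2.map
      (fun name => (rows.foldl aStep (PySem.Dict.empty, [])).1.getD name []) := rfl
  have hB : pick_preferred_alt rows = (rows.foldl bStep PySem.Dict.empty).items.map
      (fun p => [("SEO Blog Name", p.1), ("SEO Blog URL", pickUrl p.2)]) := rfl
  set st := rows.foldl aStep (PySem.Dict.empty, []) with hst
  set g := rows.foldl bStep PySem.Dict.empty with hg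
  have hnd : g.keys.Nodup := by
    rw [hg]
    exact PySem.Dict.nodup_keys_foldl_modify_key rows rowName []
      (fun _ row => (· ++ [rowUrl row])) PySem.Dict.empty PySem.Dict.nodup_keys_empty
  rw [hA, hB, PySem.Dict.items_eq_map_keys g hnd [], List.map_map, ← hord]
  apply List.map_congr_left
  intro k hk
  have hgk : g.contains k = true := (PySem.Dict.contains_iff_mem_keys g k).mpr (hord ▸ hk)
  obtain ⟨h1, _⟩ := hval k hgk
  simp only [Function.comp_apply, h1, entryOf]
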